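-- pv_equiv track=rewrite | github.com/marktellez/connect4-ml | src/game/board.py | is_potential_win
-- ===== SOURCE A (Python) =====
-- def is_potential_win(sequence, player):
--     for i in range(len(sequence)):
--         if sequence[i] == player:
--             count = 1
--             for j in range(i + 1, min(i + 4, len(sequence))):
--                 if sequence[j] != player:
--                     break
--                 count += 1
--             if count in [4]:
--                 return True
--     return False
-- ===== SOURCE B (Python) =====
-- def is_potential_win(sequence, player):
--     count = 0
--     for token in sequence:
--         if token == player:
--             count += 1
--             if count == 4:
--                 return True
--         else:
--             count = 0
--     return False
-- ===== Notes on version B (the rewrite author's own statement) =====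
-- stated objective: simpler
-- what changed: Replaced the nested restart-scan (for each matching index, rescan the next three cells) with a single element-wise pass maintaining one running consecutive-run counter that resets on mismatch.
import Mathlib
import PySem

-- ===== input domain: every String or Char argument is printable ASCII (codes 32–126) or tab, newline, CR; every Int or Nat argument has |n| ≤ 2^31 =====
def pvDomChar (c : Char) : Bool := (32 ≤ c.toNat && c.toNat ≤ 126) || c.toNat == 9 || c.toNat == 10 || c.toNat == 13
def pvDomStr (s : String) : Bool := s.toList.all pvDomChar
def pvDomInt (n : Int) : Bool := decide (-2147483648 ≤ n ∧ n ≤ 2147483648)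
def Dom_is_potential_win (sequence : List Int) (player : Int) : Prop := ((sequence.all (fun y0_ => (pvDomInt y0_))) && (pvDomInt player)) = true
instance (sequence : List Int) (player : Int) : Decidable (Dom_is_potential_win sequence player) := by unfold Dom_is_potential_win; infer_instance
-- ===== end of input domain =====

-- B replaces A's nested restart-scan with a single pass keeping a running consecutive-run counter (objective: simpler).

-- ===== PORT A =====
-- inner loop: for j in range(i+1, min(i+4, len)): break on mismatch, else count += 1
-- (counts matching elements among the next up-to-3 cells of the suffix)
def aInner (player : Int) : List Int → Nat → Int
  | _, 0 => 0
  | [], _ + 1 => 0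
  | y :: ys, n + 1 => if y ≠ player then 0 else 1 + aInner player ys n

-- outer loop: scan indices i; at a match, count = 1 + inner scan; return True if count == 4
def is_potential_win (sequence : List Int) (player : Int) : Bool :=
  match sequence with
  | [] => false
  | x :: rest =>
    if x = player then
      let count : Int := 1 + aInner player rest 3
      if count = 4 then true else is_potential_win rest player
    else is_potential_win rest player

-- ===== PORT B =====
def bGo (player : Int) : List Int → Int → Bool
  | [], _ => false
  | x :: xs, count =>
    if x = player then
      if count + 1 = 4 then true else bGo player xs (count + 1)
    else bGo player xs 0

def is_potential_win_alt (sequence : List Int) (player : Int) : Bool :=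
  bGo player sequence 0


-- ===== PRECONDITION & SPEC =====
def Spec_is_potential_win (sequence : List Int) (player : Int) (out : Bool) : Prop := out = is_potential_win_alt sequence player
instance (sequence : List Int) (player : Int) (out : Bool) : Decidable (Spec_is_potential_win sequence player out) := by unfold Spec_is_potential_win; infer_instance

-- ===== CLAIM (what is proved, stated in full; the proofs are below) =====
def Claim_equal_is_potential_win : Prop := ∀ (sequence : List Int) (player : Int), Dom_is_potential_win sequence player → Spec_is_potential_win sequence player (is_potential_win sequence player)

-- ===== LEMMAS AND PROOFS =====

-- pref player xs n: the first n elements of xs exist and all equal player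
def pref (player : Int) : List Int → Nat → Bool
  | _, 0 => true
  | [], _ + 1 => false
  | y :: ys, n + 1 => y = player && pref player ys n

theorem pref_mono (player : Int) (xs : List Int) (m n : Nat) (h : m ≤ n)
    (hp : pref player xs n = true) : pref player xs m = true := by
  induction xs generalizing m n with
  | nil =>
    cases m with
    | zero => rfl
    | succ m => cases n with
      | zero => omega
      | succ n => simp [pref] at hp
  | cons y ys ih =>
    cases m with
    | zero => rfl
    | succ m => cases n with
      | zero => omega
      | succ n =>
        simp [pref] at hp ⊢
        exact ⟨hp.1, ih m n (by omega) hp.2⟩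

theorem aInner_eq_n_iff (player : Int) (xs : List Int) (n : Nat) :
    aInner player xs n = (n : Int) ↔ pref player xs n = true := by
  induction xs generalizing n with
  | nil =>
    cases n with
    | zero => simp [aInner, pref]
    | succ n => simp [aInner, pref]; omega
  | cons y ys ih =>
    cases n with
    | zero => simp [aInner, pref]
    | succ n =>
      by_cases hy : y = player
      · simp [aInner, pref, hy]
        constructor
        · intro h
          exact (ih n).mp (by omega)
        · intro h
          have := (ih n).mpr h
          omega
      · simp [aInner, pref, hy]; omega

theorem pref_imp_A (player : Int) (xs : List Int)
    (h : pref player xs 4 = true) : is_potential_win xs player = true := by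
  cases xs with
  | nil => simp [pref] at h
  | cons y ys =>
    simp [pref] at h
    have h3 : aInner player ys 3 = (3 : Int) := (aInner_eq_n_iff player ys 3).mpr h.2
    simp [is_potential_win, h.1, h3]

theorem bGo_eq (player : Int) (xs : List Int) (c : Nat) (hc : c ≤ 3) :
    bGo player xs (c : Int) = (pref player xs (4 - c) || is_potential_win xs player) := by
  induction xs generalizing c with
  | nil =>
    have h4 : 4 - c = (3 - c) + 1 := by omega
    simp [bGo, is_potential_win, h4, pref]
  | cons x rest ih =>
    by_cases hx : x = player
    · by_cases hc3 : c = 3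
      · subst hc3
        simp [bGo, hx, pref]
      · have hlt : c + 1 ≤ 3 := by omega
        have hne : ((c : Int) + 1) ≠ 4 := by omega
        have step : bGo player (x :: rest) (c : Int) = bGo player rest ((c + 1 : Nat) : Int) := by
          simp [bGo, hx, hne]
        rw [step, ih (c + 1) hlt]
        have heq : 4 - (c + 1) = 3 - c := by omega
        have h4 : 4 - c = (3 - c) + 1 := by omega
        have hpref : pref player (x :: rest) (4 - c) = pref player rest (3 - c) := by
          rw [h4]; simp [pref, hx]
        rw [heq, hpref]
        by_cases h4c : aInner player rest 3 = (3 : Int)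
        · have hp3 : pref player rest 3 = true :=
            (aInner_eq_n_iff player rest 3).mp (by exact_mod_cast h4c)
          have hpc : pref player rest (3 - c) = true :=
            pref_mono player rest _ 3 (by omega) hp3
          have hA : is_potential_win (x :: rest) player = true := by
            simp [is_potential_win, hx]
            left; omega
          simp [hpc, hA]
        · have hA : is_potential_win (x :: rest) player = is_potential_win rest player := by
            have : ¬ ((1 : Int) + aInner player rest 3 = 4) := by
              intro h; exact h4c (by omega)
            simp [is_potential_win, hx, this]
          rw [hA]
    · have h4 : 4 - c = (3 - c) + 1 := by omega
      have step : bGo player (x :: rest) (c : Int) = bGo player rest ((0 : Nat) : Int) := by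
        simp [bGo, hx]
      rw [step, ih 0 (by omega)]
      have hA : is_potential_win (x :: rest) player = is_potential_win rest player := by
        simp [is_potential_win, hx]
      rw [hA, h4]
      simp only [pref, hx]
      by_cases hp : pref player rest 4 = true
      · simp [pref_imp_A player rest hp, hp]
      · simp [hp]

-- ===== VERDICT (by name: the statement is the Claim_ definition above) =====
theorem is_potential_win_spec : Claim_equal_is_potential_win := by
  intro sequence player _
  unfold Spec_is_potential_win is_potential_win_alt
  have h := bGo_eq player sequence 0 (by omega)
  norm_num at h
  rw [h]
  by_cases hp : pref player sequence 4 = true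
  · simp [pref_imp_A player sequence hp, hp]
  · simp [hp]
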